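-- pv_equiv track=rewrite | github.com/hieutran106/leetcode-ht | python/medium/_959_regions_cut_by_slashes/solution.py | upscale
-- ===== SOURCE A (Python) =====
-- from typing import List
--
-- def upscale(grid: List[str]):
--     n = len(grid)
--     n_upscale = 2 * n
--     result = [[0 for i in range(n_upscale)] for j in range(n_upscale)]
--     for r in range(n):
--         for c in range(n):
--             curr_char = grid[r][c]
--             upscale_row = 2 * r
--             upscale_col = 2 * c
--             if curr_char == "/":
--                 result[upscale_row][upscale_col + 1] = 1
--                 result[upscale_row + 1][upscale_col] = 1
--             elif curr_char == "\\":
--                 result[upscale_row][upscale_col] = 1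
--                 result[upscale_row + 1][upscale_col + 1] = 1
--
--     return result
-- ===== SOURCE B (Python) =====
-- def upscale(grid):
--     n = len(grid)
--     table = {'/': ([0, 1], [1, 0]), '\\': ([1, 0], [0, 1])}
--     zero = ([0, 0], [0, 0])
--     result = []
--     for row in grid:
--         blocks = [table.get(row[c], zero) for c in range(n)]
--         result.append([x for b in blocks for x in b[0]])
--         result.append([x for b in blocks for x in b[1]])
--     return result
-- ===== Notes on version B (the rewrite author's own statement) =====
-- stated objective: simpler
-- what changed: Instead of preallocating a 2n x 2n zero matrix and conditionally writing 1s into it cell by cell, B maps each character to its 2x2 block via a lookup table and assembles each pair of output rows directly by concatenation.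
import Mathlib
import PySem

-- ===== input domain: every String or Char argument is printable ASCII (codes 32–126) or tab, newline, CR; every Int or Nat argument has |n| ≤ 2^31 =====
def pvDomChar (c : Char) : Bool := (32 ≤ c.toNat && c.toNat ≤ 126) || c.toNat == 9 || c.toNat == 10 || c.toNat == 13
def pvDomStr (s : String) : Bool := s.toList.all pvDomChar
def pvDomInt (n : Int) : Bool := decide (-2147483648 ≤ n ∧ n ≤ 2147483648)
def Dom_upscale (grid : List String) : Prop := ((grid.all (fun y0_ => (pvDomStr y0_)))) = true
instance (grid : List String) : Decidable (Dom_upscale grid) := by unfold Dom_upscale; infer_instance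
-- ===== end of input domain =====

-- B replaces A's preallocated 2n×2n zero matrix with conditional in-place writes by a
-- char→2×2-block lookup table, assembling each pair of output rows directly by concatenation (objective: simpler).

-- ===== PORT A =====
-- one of A's assignments `result[i][j] = 1`
def pvSet2 (m : List (List Int)) (i j : Nat) : List (List Int) :=
  m.set i ((m.getD i []).set j 1)

-- body of A's inner loop over c (reads grid[r][c]; grid[r] is always in range since r < n)
def pvStepA (grid : List String) (r : Nat) (res : List (List Int)) (c : Nat) : List (List Int) :=
  let ch := (PySem.Str.pyGet? (grid.getD r "") (c : Int)).getD ' '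
  if ch = '/' then pvSet2 (pvSet2 res (2*r) (2*c+1)) (2*r+1) (2*c)
  else if ch = '\\' then pvSet2 (pvSet2 res (2*r) (2*c)) (2*r+1) (2*c+1)
  else res

def upscale (grid : List String) : List (List Int) :=
  let n := grid.length
  (List.range n).foldl (fun res r => (List.range n).foldl (pvStepA grid r) res)
    (List.replicate (2*n) (List.replicate (2*n) (0:Int)))

-- ===== PORT B =====
-- table.get(ch, zero)
def pvBlock (ch : Char) : List Int × List Int :=
  if ch = '/' then ([0, 1], [1, 0])
  else if ch = '\\' then ([1, 0], [0, 1])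
  else ([0, 0], [0, 0])

def upscale_alt (grid : List String) : List (List Int) :=
  let n := grid.length
  grid.foldr (fun row acc =>
    -- [table.get(row[c], zero) for c in range(n)]
    let blocks := (List.range n).map (fun (c : Nat) => pvBlock ((PySem.Str.pyGet? row (c : Int)).getD ' '))
    blocks.flatMap Prod.fst :: blocks.flatMap Prod.snd :: acc) []

-- ===== PRECONDITION & SPEC =====
-- Pre_ excludes exactly the grids on which A raises IndexError: some row shorter than len(grid).
def Pre_upscale (grid : List String) : Prop := ∀ s ∈ grid, grid.length ≤ s.toList.length
instance (grid : List String) : Decidable (Pre_upscale grid) := by unfold Pre_upscale; infer_instance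
def pvWitness_upscale : List String := ["/\\", " x"]

def Spec_upscale (grid : List String) (out : List (List Int)) : Prop := out = upscale_alt grid
instance (grid : List String) (out : List (List Int)) : Decidable (Spec_upscale grid out) := by unfold Spec_upscale; infer_instance

-- ===== CLAIM (what is proved, stated in full; the proofs are below) =====
def Claim_equal_upscale : Prop := ∀ (grid : List String), Dom_upscale grid → Pre_upscale grid → Spec_upscale grid (upscale grid)

-- ===== LEMMAS AND PROOFS =====

-- the effect of A's inner-loop body on the two rows it touches
def pvStepRow (s : List Char) (tb : List Int × List Int) (c : Nat) : List Int × List Int :=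
  let ch := s.getD c ' '
  if ch = '/' then (tb.1.set (2*c+1) 1, tb.2.set (2*c) 1)
  else if ch = '\\' then (tb.1.set (2*c) 1, tb.2.set (2*c+1) 1)
  else tb

-- the pair of output rows built for (a prefix of) source row s
def pvTop (s : List Char) : List Int := (s.map pvBlock).flatMap Prod.fst
def pvBot (s : List Char) : List Int := (s.map pvBlock).flatMap Prod.snd

-- the 2k rows A has finished after k iterations of the outer loop
def pvRows (grid : List String) (k : Nat) : List (List Int) :=
  (List.range k).flatMap (fun r =>
    [pvTop ((grid.getD r "").toList.take grid.length),
     pvBot ((grid.getD r "").toList.take grid.length)])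

lemma pvSet2_rows_fst (m : List (List Int)) (t u : List Int) (a b j : Nat)
    (hab : a ≠ b) (ha : a < m.length) :
    pvSet2 ((m.set a t).set b u) a j = (m.set a (t.set j 1)).set b u := by
  unfold pvSet2
  rw [List.getD_eq_getElem?_getD, List.getElem?_set_ne (Ne.symm hab),
    List.getElem?_set_self (by simpa using ha), Option.getD_some,
    List.set_comm u (t.set j 1) (Ne.symm hab), List.set_set]

lemma pvSet2_rows_snd (m : List (List Int)) (t u : List Int) (a b j : Nat)
    (hb : b < m.length) :
    pvSet2 ((m.set a t).set b u) b j = (m.set a t).set b (u.set j 1) := by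
  unfold pvSet2
  rw [List.getD_eq_getElem?_getD, List.getElem?_set_self (by simpa using hb), List.set_set]
  rfl

-- localization: A's inner loop only rewrites rows 2r and 2r+1, following pvStepRow
lemma foldl_stepA_loc (grid : List String) (r : Nat) (cs : List Nat)
    (m : List (List Int)) (t u : List Int) (hr : 2*r+1 < m.length) :
    cs.foldl (pvStepA grid r) ((m.set (2*r) t).set (2*r+1) u)
      = (m.set (2*r) (cs.foldl (pvStepRow (grid.getD r "").toList) (t, u)).1).set (2*r+1)
          (cs.foldl (pvStepRow (grid.getD r "").toList) (t, u)).2 := by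
  induction cs generalizing t u with
  | nil => rfl
  | cons c cs ih =>
    have hch : (PySem.Str.pyGet? (grid.getD r "") (c : Int)).getD ' '
        = (grid.getD r "").toList.getD c ' ' := by
      simp [List.getD_eq_getElem?_getD]
    have hstep : pvStepA grid r ((m.set (2*r) t).set (2*r+1) u) c
        = (m.set (2*r) (pvStepRow (grid.getD r "").toList (t, u) c).1).set (2*r+1)
            (pvStepRow (grid.getD r "").toList (t, u) c).2 := by
      unfold pvStepA pvStepRow
      rw [hch]
      dsimp only
      split_ifs
      · rw [pvSet2_rows_fst m t u _ _ _ (by omega) (by omega),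
          pvSet2_rows_snd m _ u _ _ _ (by simpa using hr)]
      · rw [pvSet2_rows_fst m t u _ _ _ (by omega) (by omega),
          pvSet2_rows_snd m _ u _ _ _ (by simpa using hr)]
      · rfl
    rw [List.foldl_cons, hstep, ih]
    rfl

lemma pvBlock_fst_len (ch : Char) : (pvBlock ch).1.length = 2 := by
  unfold pvBlock; split_ifs <;> rfl

lemma pvBlock_snd_len (ch : Char) : (pvBlock ch).2.length = 2 := by
  unfold pvBlock; split_ifs <;> rfl

lemma pvTop_len (s : List Char) : (pvTop s).length = 2 * s.length := by
  induction s with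
  | nil => rfl
  | cons c s ih => simp only [pvTop, List.map_cons, List.flatMap_cons, List.length_append,
      pvBlock_fst_len, List.length_cons] at *; omega

lemma pvBot_len (s : List Char) : (pvBot s).length = 2 * s.length := by
  induction s with
  | nil => rfl
  | cons c s ih => simp only [pvBot, List.map_cons, List.flatMap_cons, List.length_append,
      pvBlock_snd_len, List.length_cons] at *; omega

lemma pvTop_append (s t : List Char) : pvTop (s ++ t) = pvTop s ++ pvTop t := by
  simp [pvTop]

lemma pvBot_append (s t : List Char) : pvBot (s ++ t) = pvBot s ++ pvBot t := by
  simp [pvBot]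

lemma pvTop_singleton (c : Char) : pvTop [c] = (pvBlock c).1 := by
  simp [pvTop]

lemma pvBot_singleton (c : Char) : pvBot [c] = (pvBlock c).2 := by
  simp [pvBot]

-- the row-building fold produces B's rows (prefix built, suffix still zero)
lemma rowfold_eq (s : List Char) (n : Nat) (hn : n ≤ s.length) (k : Nat) (hk : k ≤ n) :
    (List.range k).foldl (pvStepRow s) (List.replicate (2*n) 0, List.replicate (2*n) 0)
      = (pvTop (s.take k) ++ List.replicate (2*(n-k)) 0,
         pvBot (s.take k) ++ List.replicate (2*(n-k)) 0) := by
  induction k with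
  | zero => simp [pvTop, pvBot]
  | succ k ih =>
    have hk' : k ≤ n := by omega
    have hkl : k < s.length := by omega
    rw [List.range_succ, List.foldl_append, ih hk']
    simp only [List.foldl_cons, List.foldl_nil]
    have htake : s.take (k+1) = s.take k ++ [s[k]] := by
      rw [List.take_add_one]; simp [List.getElem?_eq_getElem hkl]
    have hrep : List.replicate (2*(n-k)) (0:Int)
        = 0 :: 0 :: List.replicate (2*(n-(k+1))) 0 := by
      have h2 : 2*(n-k) = (2*(n-(k+1))) + 1 + 1 := by omega
      rw [h2]; simp [List.replicate_succ]
    have hlen : (pvTop (s.take k)).length = 2 * k := by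
      rw [pvTop_len, List.length_take]; omega
    have hlenb : (pvBot (s.take k)).length = 2 * k := by
      rw [pvBot_len, List.length_take]; omega
    have hget : s.getD k ' ' = s[k] := by
      simp [List.getD_eq_getElem?_getD, List.getElem?_eq_getElem hkl]
    have hst1 : ∀ (M : List Int) (v : Int),
        (pvTop (s.take k) ++ M).set (2*k+1) v = pvTop (s.take k) ++ M.set 1 v := by
      intro M v; rw [← hlen]; simp
    have hst0 : ∀ (M : List Int) (v : Int),
        (pvTop (s.take k) ++ M).set (2*k) v = pvTop (s.take k) ++ M.set 0 v := by
      intro M v; rw [← hlen]; simp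
    have hsb1 : ∀ (M : List Int) (v : Int),
        (pvBot (s.take k) ++ M).set (2*k+1) v = pvBot (s.take k) ++ M.set 1 v := by
      intro M v; rw [← hlenb]; simp
    have hsb0 : ∀ (M : List Int) (v : Int),
        (pvBot (s.take k) ++ M).set (2*k) v = pvBot (s.take k) ++ M.set 0 v := by
      intro M v; rw [← hlenb]; simp
    rw [htake, pvTop_append, pvBot_append, pvTop_singleton, pvBot_singleton]
    unfold pvStepRow
    dsimp only
    simp only [hget]
    by_cases h1 : s[k] = '/'
    · rw [if_pos h1, h1, hrep, hst1, hsb0]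
      simp [pvBlock]
    · by_cases h2 : s[k] = '\\'
      · rw [if_neg h1, if_pos h2, h2, hrep, hst0, hsb1]
        simp [pvBlock]
      · rw [if_neg h1, if_neg h2, hrep]
        simp [pvBlock, h1, h2]

lemma pvRows_len (grid : List String) (k : Nat) : (pvRows grid k).length = 2 * k := by
  induction k with
  | zero => rfl
  | succ k ih =>
    unfold pvRows at *
    rw [List.range_succ, List.flatMap_append] at *
    simp at *
    omega

lemma pvRows_succ (grid : List String) (k : Nat) :
    pvRows grid (k+1) = pvRows grid k
      ++ [pvTop ((grid.getD k "").toList.take grid.length),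
          pvBot ((grid.getD k "").toList.take grid.length)] := by
  unfold pvRows
  rw [List.range_succ, List.flatMap_append]
  simp

-- outer-loop invariant: after k rows, the first 2k output rows are B's, the rest still zero
lemma outer_eq (grid : List String) (hpre : Pre_upscale grid) (k : Nat) (hk : k ≤ grid.length) :
    (List.range k).foldl
        (fun res r => (List.range grid.length).foldl (pvStepA grid r) res)
        (List.replicate (2*grid.length) (List.replicate (2*grid.length) (0:Int)))
      = pvRows grid k
          ++ List.replicate (2*(grid.length - k)) (List.replicate (2*grid.length) (0:Int)) := by
  induction k with
  | zero => simp [pvRows]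
  | succ k ih =>
    have hk' : k ≤ grid.length := by omega
    rw [List.range_succ, List.foldl_append, ih hk']
    simp only [List.foldl_cons, List.foldl_nil]
    set z : List Int := List.replicate (2*grid.length) (0:Int) with hz
    have hrep : List.replicate (2*(grid.length - k)) z
        = z :: z :: List.replicate (2*(grid.length - (k+1))) z := by
      have h2 : 2*(grid.length - k) = (2*(grid.length - (k+1))) + 1 + 1 := by omega
      rw [h2]; simp [List.replicate_succ]
    have hlen : (pvRows grid k).length = 2 * k := pvRows_len grid k
    have hset0 : ∀ (M : List (List Int)) (v : List Int),
        (pvRows grid k ++ M).set (2*k) v = pvRows grid k ++ M.set 0 v := by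
      intro M v; rw [← hlen]; simp
    have hset1 : ∀ (M : List (List Int)) (v : List Int),
        (pvRows grid k ++ M).set (2*k+1) v = pvRows grid k ++ M.set 1 v := by
      intro M v; rw [← hlen]; simp
    have hsplit : pvRows grid k ++ List.replicate (2*(grid.length - k)) z
        = ((pvRows grid k ++ z :: z :: List.replicate (2*(grid.length - (k+1))) z).set (2*k) z).set
            (2*k+1) z := by
      rw [hset0, hset1, hrep]
      simp
    rw [hrep] at hsplit ⊢
    rw [hsplit, foldl_stepA_loc grid k _ _ z z (by
      simp only [List.length_append, hlen, List.length_cons]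
      omega)]
    have hs : grid.length ≤ (grid.getD k "").toList.length := by
      apply hpre
      rw [List.getD_eq_getElem?_getD, List.getElem?_eq_getElem (by omega : k < grid.length)]
      exact List.getElem_mem _
    have hrow := rowfold_eq (grid.getD k "").toList grid.length hs grid.length (le_refl _)
    simp only [Nat.sub_self, Nat.mul_zero, List.replicate_zero, List.append_nil] at hrow
    rw [← hz] at hrow
    rw [hrow, hset0, hset1, pvRows_succ]
    simp

lemma foldr_pair {α β : Type} (l : List α) (f g : α → β) :
    l.foldr (fun x acc => f x :: g x :: acc) [] = l.flatMap (fun x => [f x, g x]) := by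
  induction l with
  | nil => rfl
  | cons x l ih => simp [ih]

lemma row_blocks_eq (s : String) (n : Nat) (h : n ≤ s.toList.length) :
    (List.range n).map (fun (c : Nat) => pvBlock ((PySem.Str.pyGet? s (c : Int)).getD ' '))
      = (s.toList.take n).map pvBlock := by
  apply List.ext_getElem
  · simp only [List.length_map, List.length_range, List.length_take]; omega
  · intro i h1 h2
    have h3 : i < s.toList.length := by
      simp only [List.length_map, List.length_take] at h2; omega
    simp [List.getElem?_eq_getElem h3]

lemma range_getD_flatMap {α β : Type} (l : List α) (d : α) (F : α → List β) :
    (List.range l.length).flatMap (fun r => F (l.getD r d)) = l.flatMap F := by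
  induction l with
  | nil => rfl
  | cons x l ih =>
    rw [List.length_cons, List.range_succ_eq_map, List.flatMap_cons, List.flatMap_map]
    simp only [List.getD_cons_zero, List.getD_cons_succ]
    rw [List.flatMap_cons, ih]

-- ===== VERDICT (by name: the statement is the Claim_ definition above) =====
theorem upscale_spec : Claim_equal_upscale := by
  intro grid _ hpre
  unfold Spec_upscale upscale upscale_alt
  rw [outer_eq grid hpre grid.length (le_refl _)]
  simp only [Nat.sub_self, Nat.mul_zero, List.replicate_zero, List.append_nil]
  rw [foldr_pair grid
    (fun row => (((List.range grid.length).map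
      (fun (c : Nat) => pvBlock ((PySem.Str.pyGet? row (c : Int)).getD ' '))).flatMap Prod.fst))
    (fun row => (((List.range grid.length).map
      (fun (c : Nat) => pvBlock ((PySem.Str.pyGet? row (c : Int)).getD ' '))).flatMap Prod.snd))]
  rw [List.flatMap_congr (fun s hs => by
    rw [row_blocks_eq s grid.length (hpre s hs)] :
    ∀ s ∈ grid, _ = (fun s => [((s.toList.take grid.length).map pvBlock).flatMap Prod.fst,
      ((s.toList.take grid.length).map pvBlock).flatMap Prod.snd]) s)]
  unfold pvRows pvTop pvBot
  rw [range_getD_flatMap grid ""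
    (fun s => [((s.toList.take grid.length).map pvBlock).flatMap Prod.fst,
               ((s.toList.take grid.length).map pvBlock).flatMap Prod.snd])]
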